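-- pv_equiv track=rewrite | github.com/apraveena/Interview_Prep_SecondRound | SortingAlgorithms/OnlineMedian.py | online_median_brute_force
-- ===== SOURCE A (Python) =====
-- def online_median_brute_force(stream):
--     """
--     Args:
--      stream(list_int32)
--     Returns:
--      list_int32
--     """
--     # Brute Force
--     result = []
--     def helper(arr, start, end):
--         arr = stream[start:end]
--         arr.sort()
--         n = len(arr)
--         mid = start + (end - start) // 2
--         if n == 2:
--             result.append((arr[0] + arr[1])//2)
--         elif n % 2 == 0:
--             mid1 = mid - 1
--             result.append((arr[mid] + arr[mid1]) // 2)
--         else: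
--             result.append(arr[mid])
--
--     for i in range(len(stream)):
--         helper(stream[:i + 1], 0, i+1)
--
--     return result
-- ===== SOURCE B (Python) =====
-- def online_median_brute_force(stream):
--     """
--     Args:
--      stream(list_int32)
--     Returns:
--      list_int32
--     """
--     # Incremental: keep the prefix sorted, insert each new value at its
--     # position found by binary search, read the median off directly.
--     prefix = []
--     result = []
--     for x in stream:
--         lo, hi = 0, len(prefix)
--         while lo < hi:
--             mid = (lo + hi) // 2
--             if prefix[mid] <= x:
--                 lo = mid + 1
--             else:
--                 hi = mid
--         prefix.insert(lo, x)
--         n = len(prefix)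
--         m = n // 2
--         if n % 2 == 1:
--             result.append(prefix[m])
--         else:
--             result.append((prefix[m - 1] + prefix[m]) // 2)
--     return result
-- ===== Notes on version B (the rewrite author's own statement) =====
-- stated objective: faster
-- what changed: Instead of re-slicing and fully re-sorting every prefix, B maintains one sorted prefix incrementally, inserting each new element at the position found by binary search and reading the median off directly.
import Mathlib
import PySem

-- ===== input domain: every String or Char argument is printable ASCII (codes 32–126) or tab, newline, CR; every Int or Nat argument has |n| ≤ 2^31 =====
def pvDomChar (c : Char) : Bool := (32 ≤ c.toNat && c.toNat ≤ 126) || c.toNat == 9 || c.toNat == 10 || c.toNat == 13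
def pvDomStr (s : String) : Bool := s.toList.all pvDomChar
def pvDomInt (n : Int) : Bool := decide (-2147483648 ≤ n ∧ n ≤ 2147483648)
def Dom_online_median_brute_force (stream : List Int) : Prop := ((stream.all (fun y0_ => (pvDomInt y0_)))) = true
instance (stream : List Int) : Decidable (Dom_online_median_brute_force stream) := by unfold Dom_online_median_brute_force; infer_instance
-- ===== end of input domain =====

-- B replaces A's full re-sort of every prefix by one incrementally maintained sorted list
-- (binary-search insert per element); same outputs, measurably faster.

-- ===== PORT A =====
-- helper(arr, start, end) is always called with start = 0, end = i+1; it recomputes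
-- arr = stream[start:end], sorts it, and appends the median to result.
def online_median_brute_force (stream : List Int) : List Int :=
  (PySem.List.pyRange 0 (stream.length : Int) 1).foldl
    (fun result i =>
      let arr := PySem.List.sorted (PySem.List.slice stream (some 0) (some (i + 1))) (fun x => x) false
      let n : Int := (arr.length : Int)
      let mid := 0 + PySem.Int.floordiv ((i + 1) - 0) 2
      if n == 2 then
        result ++ [PySem.Int.floordiv (PySem.List.pyGetD arr 0 0 + PySem.List.pyGetD arr 1 0) 2]
      else if PySem.Int.mod n 2 == 0 then
        let mid1 := mid - 1
        result ++ [PySem.Int.floordiv (PySem.List.pyGetD arr mid 0 + PySem.List.pyGetD arr mid1 0) 2]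
      else
        result ++ [PySem.List.pyGetD arr mid 0]) []

-- ===== PORT B =====
-- the 'while lo < hi' binary-search loop of Source B (lo, hi are always ≥ 0)
def omBisect (pfx : List Int) (x : Int) (lo hi : Nat) : Nat :=
  if lo < hi then
    let mid := (lo + hi) / 2
    if PySem.List.pyGetD pfx (mid : Int) 0 ≤ x then omBisect pfx x (mid + 1) hi
    else omBisect pfx x lo mid
  else lo
termination_by hi - lo
decreasing_by all_goals omega

-- one iteration of Source B's for-loop: (sorted prefix, result) -> updated pair
def omStep (st : List Int × List Int) (x : Int) : List Int × List Int :=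
  let lo := omBisect st.1 x 0 st.1.length
  let pfx' := PySem.List.insert st.1 (lo : Int) x
  let n := pfx'.length
  let m := n / 2
  if n % 2 == 1 then
    (pfx', st.2 ++ [PySem.List.pyGetD pfx' (m : Int) 0])
  else
    (pfx', st.2 ++ [PySem.Int.floordiv
        (PySem.List.pyGetD pfx' ((m : Int) - 1) 0 + PySem.List.pyGetD pfx' (m : Int) 0) 2])

def online_median_brute_force_alt (stream : List Int) : List Int :=
  (stream.foldl omStep ([], [])).2


-- ===== PRECONDITION & SPEC =====
def Spec_online_median_brute_force (stream : List Int) (out : List Int) : Prop := out = online_median_brute_force_alt stream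
instance (stream : List Int) (out : List Int) : Decidable (Spec_online_median_brute_force stream out) := by unfold Spec_online_median_brute_force; infer_instance

-- ===== CLAIM (what is proved, stated in full; the proofs are below) =====
def Claim_equal_online_median_brute_force : Prop := ∀ (stream : List Int), Dom_online_median_brute_force stream → Spec_online_median_brute_force stream (online_median_brute_force stream)

-- ===== LEMMAS AND PROOFS =====

-- the sorted prefix, and the median B reads off a sorted list s
def omSortedId (s : List Int) : List Int := PySem.List.sorted s (fun x => x) false

def omMedOf (s : List Int) : Int :=
  let n := s.length
  let m := n / 2
  if n % 2 == 1 then PySem.List.pyGetD s (m : Int) 0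
  else PySem.Int.floordiv (PySem.List.pyGetD s ((m : Int) - 1) 0 + PySem.List.pyGetD s (m : Int) 0) 2

def omIns (acc : List Int) (x : Int) : List Int :=
  PySem.List.insertBy (fun a b => decide (a < b)) x acc

-- the per-prefix medians; A's and B's i-th output both reduce to this
def omMeds (p l : List Int) : List Int :=
  match l with
  | [] => []
  | x :: t => omMedOf (omSortedId (p ++ [x])) :: omMeds (p ++ [x]) t

-- the value A's i-th iteration appends
def omGA (stream : List Int) (i : Int) : Int :=
  let arr := PySem.List.sorted (PySem.List.slice stream (some 0) (some (i + 1))) (fun x => x) false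
  let n : Int := (arr.length : Int)
  let mid := 0 + PySem.Int.floordiv ((i + 1) - 0) 2
  if n == 2 then
    PySem.Int.floordiv (PySem.List.pyGetD arr 0 0 + PySem.List.pyGetD arr 1 0) 2
  else if PySem.Int.mod n 2 == 0 then
    let mid1 := mid - 1
    PySem.Int.floordiv (PySem.List.pyGetD arr mid 0 + PySem.List.pyGetD arr mid1 0) 2
  else
    PySem.List.pyGetD arr mid 0

theorem omSortedId_append_singleton (p : List Int) (x : Int) :
    omSortedId (p ++ [x]) = omIns (omSortedId p) x := by
  simp [omSortedId, omIns, PySem.List.sorted_eq_foldl_insertBy, List.foldl_append]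

-- inserting at a position k that splits ≤ x from > x is exactly insertBy (no sortedness needed)
theorem insert_split_eq_insertBy (x : Int) :
    ∀ (sp : List Int) (k : Nat), k ≤ sp.length →
    (∀ i (h : i < sp.length), i < k → sp[i] ≤ x) →
    (∀ i (h : i < sp.length), k ≤ i → x < sp[i]) →
    sp.take k ++ x :: sp.drop k = omIns sp x := by
  intro sp
  induction sp with
  | nil =>
    intro k hk _ _
    have : k = 0 := by simpa using hk
    subst this
    simp [omIns, PySem.List.insertBy]
  | cons y t ih =>
    intro k hk h1 h2
    cases k with
    | zero =>
      have hy : x < y := h2 0 (by simp) (by omega)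
      simp [omIns, PySem.List.insertBy, hy]
    | succ k' =>
      have hy : y ≤ x := h1 0 (by simp) (by omega)
      have hny : ¬ x < y := by omega
      simp only [List.take_succ_cons, List.drop_succ_cons, List.cons_append]
      rw [ih k' (by simpa using hk)
        (fun i h hi => h1 (i+1) (by simpa using h) (by omega))
        (fun i h hi => h2 (i+1) (by simpa using h) (by omega))]
      simp [omIns, PySem.List.insertBy, hny]

-- the binary-search loop preserves its invariant (sortedness makes the halves coherent)
theorem omBisect_inv (p : List Int) (x : Int) :
    ∀ (lo hi : Nat), lo ≤ hi → hi ≤ (omSortedId p).length →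
    (∀ i (h : i < (omSortedId p).length), i < lo → (omSortedId p)[i] ≤ x) →
    (∀ i (h : i < (omSortedId p).length), hi ≤ i → x < (omSortedId p)[i]) →
    omBisect (omSortedId p) x lo hi ≤ (omSortedId p).length ∧
    (∀ i (h : i < (omSortedId p).length), i < omBisect (omSortedId p) x lo hi → (omSortedId p)[i] ≤ x) ∧
    (∀ i (h : i < (omSortedId p).length), omBisect (omSortedId p) x lo hi ≤ i → x < (omSortedId p)[i]) := by
  intro lo hi
  induction hmeas : hi - lo using Nat.strong_induction_on generalizing lo hi with
  | _ d ih =>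
  intro hlohi hhi h1 h2
  subst hmeas
  rw [omBisect]
  by_cases hlt : lo < hi
  · have hmidlt : (lo + hi) / 2 < (omSortedId p).length := by omega
    have hmidval : PySem.List.pyGetD (omSortedId p) (((lo + hi) / 2 : Nat) : Int) 0
        = (omSortedId p)[(lo + hi) / 2] := by
      rw [PySem.List.pyGetD_natCast]
      simp [List.getD_eq_getElem?_getD, List.getElem?_eq_getElem hmidlt]
    simp only [hlt, if_true, hmidval]
    by_cases hc : (omSortedId p)[(lo + hi) / 2] ≤ x
    · simp only [hc, if_true]
      refine ih (hi - ((lo + hi) / 2 + 1)) (by omega) ((lo + hi) / 2 + 1) hi rfl (by omega) hhi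
        (fun i h hi' => ?_) h2
      by_cases hil : i < lo
      · exact h1 i h hil
      · calc (omSortedId p)[i] ≤ (omSortedId p)[(lo + hi) / 2] := by
              have := PySem.List.sorted_id_getElem_mono (xs := p) (p := i) (q := (lo + hi) / 2)
                (by omega) (by simpa [omSortedId] using hmidlt)
              simpa [omSortedId] using this
          _ ≤ x := hc
    · simp only [hc, if_false]
      rw [not_le] at hc
      refine ih ((lo + hi) / 2 - lo) (by omega) lo ((lo + hi) / 2) rfl (by omega) (by omega) h1
        (fun i h hi' => ?_)
      calc x < (omSortedId p)[(lo + hi) / 2] := hc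
        _ ≤ (omSortedId p)[i] := by
            have := PySem.List.sorted_id_getElem_mono (xs := p) (p := (lo + hi) / 2) (q := i)
              (by omega) (by simpa [omSortedId] using h)
            simpa [omSortedId] using this
  · simp only [hlt, if_false]
    exact ⟨by omega, fun i h hi' => h1 i h (by omega), fun i h hi' => h2 i h (by omega)⟩

theorem insert_bisect_eq_ins (p : List Int) (x : Int) :
    PySem.List.insert (omSortedId p)
        ((omBisect (omSortedId p) x 0 (omSortedId p).length : Nat) : Int) x
      = omIns (omSortedId p) x := by
  obtain ⟨hk, h1, h2⟩ := omBisect_inv p x 0 (omSortedId p).length (by omega) le_rfl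
    (fun i h hi => by omega) (fun i h hi => by omega)
  rw [PySem.List.insert_natCast _ _ _ hk]
  exact insert_split_eq_insertBy x (omSortedId p) _ hk h1 h2

-- one step of B, from a state whose first component is the sorted prefix
theorem bStep_eq (p res : List Int) (x : Int) :
    omStep (omSortedId p, res) x
    = (omSortedId (p ++ [x]), res ++ [omMedOf (omSortedId (p ++ [x]))]) := by
  have hins : PySem.List.insert (omSortedId p)
      ((omBisect (omSortedId p) x 0 (omSortedId p).length : Nat) : Int) x
      = omSortedId (p ++ [x]) := by
    rw [insert_bisect_eq_ins, omSortedId_append_singleton]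
  simp only [omStep, hins, omMedOf]
  by_cases hpar : (omSortedId (p ++ [x])).length % 2 = 1 <;> simp [hpar]

theorem foldB (l : List Int) : ∀ (p res : List Int),
    (l.foldl omStep (omSortedId p, res))
    = (omSortedId (p ++ l), res ++ omMeds p l) := by
  induction l with
  | nil => intro p res; simp [omMeds]
  | cons x t ih =>
    intro p res
    rw [List.foldl_cons, bStep_eq p res x, ih (p ++ [x]) (res ++ [omMedOf (omSortedId (p ++ [x]))])]
    simp [omMeds]

theorem alt_eq_meds (stream : List Int) :
    online_median_brute_force_alt stream = omMeds [] stream := by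
  have h0 : omSortedId ([] : List Int) = [] := rfl
  have h := foldB stream [] []
  rw [h0] at h
  simp [online_median_brute_force_alt, h]

-- A's loop body only appends one value
theorem bodyA_eq (stream : List Int) :
    (fun (result : List Int) (i : Int) =>
      let arr := PySem.List.sorted (PySem.List.slice stream (some 0) (some (i + 1))) (fun x => x) false
      let n : Int := (arr.length : Int)
      let mid := 0 + PySem.Int.floordiv ((i + 1) - 0) 2
      if n == 2 then
        result ++ [PySem.Int.floordiv (PySem.List.pyGetD arr 0 0 + PySem.List.pyGetD arr 1 0) 2]
      else if PySem.Int.mod n 2 == 0 then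
        let mid1 := mid - 1
        result ++ [PySem.Int.floordiv (PySem.List.pyGetD arr mid 0 + PySem.List.pyGetD arr mid1 0) 2]
      else
        result ++ [PySem.List.pyGetD arr mid 0])
    = (fun result i => result ++ [omGA stream i]) := by
  funext r i
  simp only [omGA]
  split_ifs <;> rfl

-- A's i-th value (i = ↑k, k < stream.length) is the median of the sorted (k+1)-prefix
theorem omGA_eq_medOf (stream : List Int) (k : Nat) (hk : k < stream.length) :
    omGA stream (k : Int) = omMedOf (omSortedId (stream.take (k + 1))) := by
  have hsl : PySem.List.slice stream (some 0) (some ((k : Int) + 1)) = stream.take (k + 1) := by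
    have h : ((k : Int) + 1) = ((k + 1 : Nat) : Int) := by push_cast; ring
    rw [h, PySem.List.slice_zero_start, PySem.List.slice_to_natCast]
  have hlen : (omSortedId (stream.take (k + 1))).length = k + 1 := by
    simp only [omSortedId, PySem.List.length_sorted, List.length_take]
    omega
  have hmid : 0 + PySem.Int.floordiv (((k : Int) + 1) - 0) 2 = (((k + 1) / 2 : Nat) : Int) := by
    have h : ((k : Int) + 1) - 0 = ((k + 1 : Nat) : Int) := by push_cast; ring
    rw [h, zero_add]
    exact_mod_cast PySem.Int.floordiv_natCast (k + 1) 2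
  have hmod : PySem.Int.mod (((k + 1 : Nat)) : Int) 2 = (((k + 1) % 2 : Nat) : Int) := by
    exact_mod_cast PySem.Int.mod_natCast (k + 1) 2
  rw [omGA]
  rw [show PySem.List.sorted (PySem.List.slice stream (some 0) (some ((k : Int) + 1)))
        (fun x => x) false = omSortedId (stream.take (k + 1)) from by rw [omSortedId, hsl]]
  rw [omMedOf, hmid, hlen]
  simp only [beq_iff_eq, hmod]
  split_ifs with hA hR hB hR'
  all_goals first
    | rfl
    | (exfalso; omega)
    | (rw [show k = 1 from by omega]; norm_num)
    | ((try dsimp only); rw [add_comm])  -- even case: the two addends are commuted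

-- peel A's range loop, prefix by prefix
theorem mapA_eq_meds (stream : List Int) : ∀ (k : Nat), k ≤ stream.length →
    (PySem.List.pyRange (k : Int) (stream.length : Int) 1).map (omGA stream)
    = omMeds (stream.take k) (stream.drop k) := by
  intro k
  induction hmeas : stream.length - k using Nat.strong_induction_on generalizing k with
  | _ d ih =>
  intro hk
  subst hmeas
  by_cases hlt : k < stream.length
  · rw [PySem.List.pyRange_one_cons (by exact_mod_cast hlt), List.map_cons]
    have hdrop : stream.drop k = stream[k] :: stream.drop (k + 1) :=
      List.drop_eq_getElem_cons hlt
    have htake : stream.take k ++ [stream[k]] = stream.take (k + 1) := by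
      rw [List.take_add_one, List.getElem?_eq_getElem hlt]
      rfl
    rw [hdrop]
    show omGA stream (k : Int) :: _
        = omMedOf (omSortedId (stream.take k ++ [stream[k]]))
          :: omMeds (stream.take k ++ [stream[k]]) (stream.drop (k + 1))
    rw [htake, omGA_eq_medOf stream k hlt,
      show (k : Int) + 1 = ((k + 1 : Nat) : Int) by push_cast; ring,
      ih (stream.length - (k + 1)) (by omega) (k + 1) rfl (by omega)]
  · have hk' : k = stream.length := by omega
    subst hk'
    rw [List.drop_length]
    simp [PySem.List.pyRange, omMeds]

theorem a_eq_meds (stream : List Int) :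
    online_median_brute_force stream = omMeds [] stream := by
  rw [online_median_brute_force, bodyA_eq stream]
  rw [PySem.List.foldl_append_singleton_eq_map]
  have h := mapA_eq_meds stream 0 (by omega)
  simpa using h

-- ===== VERDICT (by name: the statement is the Claim_ definition above) =====
theorem online_median_brute_force_spec : Claim_equal_online_median_brute_force := by
  intro stream _
  unfold Spec_online_median_brute_force
  rw [a_eq_meds, alt_eq_meds]
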